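-- pv_equiv track=rewrite | github.com/JacoLabs/calendar-api | test_android_calendar_fix.py | _validate_package_name
-- ===== SOURCE A (Python) =====
-- def _validate_package_name(package_name: str) -> bool:
--     """Validate Android package name format."""
--     if not package_name or not isinstance(package_name, str):
--         return False
--
--     # Basic validation: should contain dots and be lowercase
--     parts = package_name.split('.')
--     if len(parts) < 2:
--         return False
--
--     for part in parts:
--         if not part or not part.replace('_', '').isalnum():
--             return False
--
--     return True
-- ===== SOURCE B (Python) =====
-- def _validate_package_name(package_name: str) -> bool:
--     """Validate Android package name format (single pass, no split/replace)."""
--     if not package_name or not isinstance(package_name, str):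
--         return False
--     cur_len = 0      # chars in the current dot-separated part
--     cur_alnum = 0    # alphanumeric chars in the current part
--     dots = 0
--     for c in package_name:
--         if c == '.':
--             if cur_len == 0 or cur_alnum == 0:
--                 return False
--             cur_len = 0
--             cur_alnum = 0
--             dots += 1
--         elif c == '_':
--             cur_len += 1
--         elif c.isalnum():
--             cur_len += 1
--             cur_alnum += 1
--         else:
--             return False
--     return dots >= 1 and cur_len > 0 and cur_alnum > 0
-- ===== Notes on version B (the rewrite author's own statement) =====
-- stated objective: alternative
-- what changed: Replaces split('.') plus a per-part replace('_','')/isalnum test with a single character scan maintaining the current part's length, its alnum count and a dot count; it trades CPython's C-implemented string methods for one pure-Python pass with no intermediate part strings.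
import Mathlib
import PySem

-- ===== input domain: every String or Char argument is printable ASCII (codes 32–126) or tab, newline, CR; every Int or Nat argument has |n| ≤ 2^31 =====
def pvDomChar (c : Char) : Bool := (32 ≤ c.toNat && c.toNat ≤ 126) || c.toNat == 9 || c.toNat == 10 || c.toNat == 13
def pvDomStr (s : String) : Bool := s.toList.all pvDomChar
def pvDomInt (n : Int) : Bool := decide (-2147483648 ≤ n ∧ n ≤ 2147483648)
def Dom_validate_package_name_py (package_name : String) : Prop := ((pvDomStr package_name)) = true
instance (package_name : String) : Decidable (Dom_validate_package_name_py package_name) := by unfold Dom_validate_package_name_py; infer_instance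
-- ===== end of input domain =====

-- B replaces split('.') + per-part replace('_','')/isalnum with one character scan keeping
-- (current part length, its alnum count, dot count); same return value on every string.


-- ===== PORT A =====
-- Literal port of A: split on '.', require at least two parts, and require every part
-- nonempty with part.replace('_','').isalnum().
def validate_package_name_py (package_name : String) : Bool :=
  if package_name = "" then false
  else
    let parts := PySem.Chars.splitOn package_name.toList ['.']
    if parts.length < 2 then false
    else parts.all (fun part =>
      !part.isEmpty && PySem.Chars.strIsalnum (PySem.Chars.replace part ['_'] []))

-- ===== PORT B =====
-- the single-pass loop of Source B: current part length, its alnum count, dot count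
def altLoop : List Char → Nat → Nat → Nat → Bool
  | [], curLen, curAlnum, dots =>
    decide (1 ≤ dots) && decide (0 < curLen) && decide (0 < curAlnum)
  | c :: cs, curLen, curAlnum, dots =>
    if c = '.' then
      if curLen == 0 || curAlnum == 0 then false
      else altLoop cs 0 0 (dots + 1)
    else if c = '_' then altLoop cs (curLen + 1) curAlnum dots
    else if PySem.Chars.isalnum c then altLoop cs (curLen + 1) (curAlnum + 1) dots
    else false

def validate_package_name_py_alt (package_name : String) : Bool :=
  if package_name = "" then false
  else altLoop package_name.toList 0 0 0

-- ===== PRECONDITION & SPEC =====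
def Spec_validate_package_name_py (package_name : String) (out : Bool) : Prop := out = validate_package_name_py_alt package_name
instance (package_name : String) (out : Bool) : Decidable (Spec_validate_package_name_py package_name out) := by unfold Spec_validate_package_name_py; infer_instance

-- ===== CLAIM (what is proved, stated in full; the proofs are below) =====
def Claim_equal_validate_package_name_py : Prop := ∀ (package_name : String), Dom_validate_package_name_py package_name → Spec_validate_package_name_py package_name (validate_package_name_py package_name)

-- ===== LEMMAS AND PROOFS =====

-- structural characterisation of splitOn on the single-char separator '.'
def simpleSplit : List Char → List (List Char)
  | [] => [[]]
  | c :: cs =>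
    if c = '.' then [] :: simpleSplit cs
    else
      match simpleSplit cs with
      | [] => [[c]]
      | p :: ps => (c :: p) :: ps

lemma simpleSplit_ne_nil (l : List Char) : simpleSplit l ≠ [] := by
  cases l with
  | nil => simp [simpleSplit]
  | cons c cs =>
    simp only [simpleSplit]
    split
    · simp
    · cases h : simpleSplit cs <;> simp

-- step equations for PySem.Chars.splitOn.go with sep = ['.']
lemma splitGo_nil (f : Nat) (cur : List Char) (acc : List (List Char)) :
    PySem.Chars.splitOn.go ['.'] (f + 1) [] cur acc = (cur.reverse :: acc).reverse := by
  rw [PySem.Chars.splitOn.go]; simp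

lemma splitGo_dot (f : Nat) (cs cur : List Char) (acc : List (List Char)) :
    PySem.Chars.splitOn.go ['.'] (f + 1) ('.' :: cs) cur acc
      = PySem.Chars.splitOn.go ['.'] f cs [] (cur.reverse :: acc) := by
  rw [PySem.Chars.splitOn.go]; simp [List.isPrefixOf]

lemma splitGo_other (f : Nat) (c : Char) (cs cur : List Char) (acc : List (List Char))
    (hc : ¬ c = '.') :
    PySem.Chars.splitOn.go ['.'] (f + 1) (c :: cs) cur acc
      = PySem.Chars.splitOn.go ['.'] f cs (c :: cur) acc := by
  have hpre : List.isPrefixOf ['.'] (c :: cs) = false := by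
    simp [List.isPrefixOf]; exact fun h' => (hc h'.symm).elim
  rw [PySem.Chars.splitOn.go]; simp [hpre]

lemma go_split (fuel : Nat) : ∀ (l cur : List Char) (acc : List (List Char)),
    l.length < fuel →
    PySem.Chars.splitOn.go ['.'] fuel l cur acc
      = acc.reverse ++ (simpleSplit l).modifyHead (cur.reverse ++ ·) := by
  induction fuel with
  | zero => intro l cur acc h; omega
  | succ f ih =>
    intro l cur acc h
    cases l with
    | nil => simp [splitGo_nil, simpleSplit]
    | cons c cs =>
      by_cases hc : c = '.'
      · subst hc
        rw [splitGo_dot, ih cs [] _ (by simp at h; omega)]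
        simp only [simpleSplit, List.reverse_nil, List.nil_append,
          List.reverse_cons, List.append_assoc, List.singleton_append]
        cases simpleSplit cs <;> simp
      · rw [splitGo_other f c cs cur acc hc, ih cs (c :: cur) acc (by simp at h ⊢; omega)]
        simp only [simpleSplit, hc, if_neg, not_false_eq_true]
        cases hs : simpleSplit cs with
        | nil => exact absurd hs (simpleSplit_ne_nil cs)
        | cons p ps => simp

lemma splitOn_dot (l : List Char) : PySem.Chars.splitOn l ['.'] = simpleSplit l := by
  unfold PySem.Chars.splitOn
  rw [go_split (l.length + 1) l [] [] (by omega)]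
  cases h : simpleSplit l with
  | nil => exact absurd h (simpleSplit_ne_nil l)
  | cons p ps => simp

-- step equations for PySem.Chars.replace.go with old = ['_'], new = []
lemma replGo_nil (f : Nat) (acc : List Char) :
    PySem.Chars.replace.go ['_'] [] (f + 1) [] acc = acc.reverse := by
  rw [PySem.Chars.replace.go]; simp

lemma replGo_underscore (f : Nat) (cs acc : List Char) :
    PySem.Chars.replace.go ['_'] [] (f + 1) ('_' :: cs) acc
      = PySem.Chars.replace.go ['_'] [] f cs acc := by
  rw [PySem.Chars.replace.go]; simp [List.isPrefixOf]

lemma replGo_other (f : Nat) (c : Char) (cs acc : List Char) (hc : ¬ c = '_') :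
    PySem.Chars.replace.go ['_'] [] (f + 1) (c :: cs) acc
      = PySem.Chars.replace.go ['_'] [] f cs (c :: acc) := by
  have hpre : List.isPrefixOf ['_'] (c :: cs) = false := by
    simp [List.isPrefixOf]; exact fun h' => (hc h'.symm).elim
  rw [PySem.Chars.replace.go]; simp [hpre]

lemma go_replace (fuel : Nat) : ∀ (l acc : List Char),
    l.length ≤ fuel →
    PySem.Chars.replace.go ['_'] [] fuel l acc = acc.reverse ++ l.filter (· ≠ '_') := by
  induction fuel with
  | zero =>
    intro l acc h
    have : l = [] := by cases l <;> simp_all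
    subst this
    rw [PySem.Chars.replace.go]; simp
  | succ f ih =>
    intro l acc h
    cases l with
    | nil => simp [replGo_nil]
    | cons c cs =>
      by_cases hc : c = '_'
      · subst hc
        rw [replGo_underscore, ih cs acc (by simp at h; omega)]
        simp
      · rw [replGo_other f c cs acc hc, ih cs (c :: acc) (by simp at h ⊢; omega)]
        simp [hc]

lemma replace_underscore (l : List Char) :
    PySem.Chars.replace l ['_'] [] = l.filter (· ≠ '_') := by
  unfold PySem.Chars.replace
  simp only [List.isEmpty_cons, if_neg, Bool.false_eq_true, not_false_eq_true]
  exact go_replace l.length l [] le_rfl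

-- state machine over the part structure, mirroring altLoop
def evalPart : List Char → Nat → Nat → Option (Nat × Nat)
  | [], cl, ca => some (cl, ca)
  | c :: cs, cl, ca =>
    if c = '_' then evalPart cs (cl + 1) ca
    else if PySem.Chars.isalnum c then evalPart cs (cl + 1) (ca + 1)
    else none

def evalParts : List (List Char) → Nat → Nat → Nat → Bool
  | [], _, _, _ => false
  | [p], cl, ca, d =>
    match evalPart p cl ca with
    | none => false
    | some (cl', ca') => decide (1 ≤ d) && decide (0 < cl') && decide (0 < ca')
  | p :: ps, cl, ca, d =>
    match evalPart p cl ca with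
    | none => false
    | some (cl', ca') => if cl' == 0 || ca' == 0 then false else evalParts ps 0 0 (d + 1)

lemma evalParts_cons_char (c : Char) (p : List Char) (ps : List (List Char))
    (cl ca d : Nat) :
    evalParts ((c :: p) :: ps) cl ca d =
      if c = '_' then evalParts (p :: ps) (cl + 1) ca d
      else if PySem.Chars.isalnum c then evalParts (p :: ps) (cl + 1) (ca + 1) d
      else false := by
  cases ps <;> by_cases h1 : c = '_' <;> by_cases h2 : PySem.Chars.isalnum c <;>
    simp [evalParts, evalPart, h1, h2]

lemma altLoop_eq (l : List Char) : ∀ (cl ca d : Nat),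
    altLoop l cl ca d = evalParts (simpleSplit l) cl ca d := by
  induction l with
  | nil => intro cl ca d; simp [altLoop, simpleSplit, evalParts, evalPart, Bool.and_assoc]
  | cons c cs ih =>
    intro cl ca d
    by_cases hc : c = '.'
    · subst hc
      have h1 : simpleSplit ('.' :: cs) = [] :: simpleSplit cs := by simp [simpleSplit]
      cases hs : simpleSplit cs with
      | nil => exact absurd hs (simpleSplit_ne_nil cs)
      | cons p ps =>
        rw [h1, hs]
        have hA : altLoop ('.' :: cs) cl ca d
            = if (cl == 0 || ca == 0) then false else altLoop cs 0 0 (d + 1) := by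
          simp [altLoop]
        have hB : evalParts ([] :: p :: ps) cl ca d
            = if (cl == 0 || ca == 0) then false else evalParts (p :: ps) 0 0 (d + 1) := by
          simp [evalParts, evalPart]
        rw [hA, hB]
        by_cases hz : (cl == 0 || ca == 0) = true
        · simp [hz]
        · simp only [hz, Bool.false_eq_true, not_false_eq_true, if_neg]
          rw [ih, hs]
    · have h1 : simpleSplit (c :: cs) =
          match simpleSplit cs with
          | [] => [[c]]
          | p :: ps => (c :: p) :: ps := by simp [simpleSplit, hc]
      cases hs : simpleSplit cs with
      | nil => exact absurd hs (simpleSplit_ne_nil cs)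
      | cons p ps =>
        rw [h1, hs, evalParts_cons_char]
        by_cases h_ : c = '_'
        · subst h_
          rw [if_pos rfl]
          have hA : altLoop ('_' :: cs) cl ca d = altLoop cs (cl + 1) ca d := by
            simp [altLoop, hc]
          rw [hA, ih, hs]
        · by_cases ha : PySem.Chars.isalnum c = true
          · rw [if_neg h_, if_pos ha]
            have hA : altLoop (c :: cs) cl ca d = altLoop cs (cl + 1) (ca + 1) d := by
              simp [altLoop, hc, h_, ha]
            rw [hA, ih, hs]
          · rw [if_neg h_, if_neg ha]
            simp [altLoop, hc, h_, ha]

lemma underscore_not_alnum : PySem.Chars.isalnum '_' = false := by decide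

lemma evalPart_spec (p : List Char) : ∀ (cl ca : Nat),
    evalPart p cl ca =
      if p.all (fun c => c = '_' || PySem.Chars.isalnum c)
      then some (cl + p.length, ca + p.countP (fun c => PySem.Chars.isalnum c))
      else none := by
  induction p with
  | nil => intro cl ca; simp [evalPart]
  | cons c cs ih =>
    intro cl ca
    by_cases h_ : c = '_'
    · simp only [evalPart, h_, if_pos]
      rw [ih]
      simp [underscore_not_alnum, Nat.add_assoc, Nat.add_comm 1]
    · by_cases ha : PySem.Chars.isalnum c = true
      · simp only [evalPart, h_, ha, if_neg, if_pos, not_false_eq_true]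
        rw [ih]
        simp [ha, h_, Nat.add_assoc, Nat.add_comm 1]
      · simp [evalPart, h_, ha]

-- A's per-part test agrees with the state-machine verdict for one part
lemma partGood_eq (p : List Char) :
    (match evalPart p 0 0 with
     | none => false
     | some (cl, ca) => decide (0 < cl) && decide (0 < ca)) =
    (!p.isEmpty && PySem.Chars.strIsalnum (PySem.Chars.replace p ['_'] [])) := by
  rw [replace_underscore, evalPart_spec]
  simp only [PySem.Chars.strIsalnum]
  by_cases hall : p.all (fun c => c = '_' || PySem.Chars.isalnum c) = true
  · simp only [hall, if_pos]
    have hfa : (p.filter (· ≠ '_')).all PySem.Chars.isalnum = true := by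
      simp only [List.all_eq_true, List.mem_filter, decide_eq_true_eq] at *
      intro c hc
      rcases hc with ⟨hm, hne⟩
      rcases (by simpa using hall c hm) with h | h
      · exact absurd h (by simpa using hne)
      · exact h
    have hcnt : (0 < p.countP (fun c => PySem.Chars.isalnum c)) ↔
        ¬ (p.filter (· ≠ '_')).isEmpty = true := by
      rw [List.countP_pos_iff]
      simp only [List.isEmpty_iff, List.filter_eq_nil_iff]
      constructor
      · rintro ⟨c, hm, hc⟩ h
        have := h c hm
        simp only [decide_eq_true_eq, not_not] at this
        subst this
        rw [underscore_not_alnum] at hc; simp at hc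
      · intro h
        push_neg at h
        rcases h with ⟨c, hm, hne⟩
        simp only [List.all_eq_true] at hall
        rcases (by simpa using hall c hm) with h' | h'
        · exact absurd hne (by simp [h'])
        · exact ⟨c, hm, h'⟩
    by_cases hpos : 0 < p.countP (fun c => PySem.Chars.isalnum c)
    · have hne : (p.filter (· ≠ '_')).isEmpty = false := by
        rcases Bool.eq_false_or_eq_true ((p.filter (· ≠ '_')).isEmpty) with h | h
        · exact absurd h (hcnt.mp hpos)
        · exact h
      have hp : p.isEmpty = false := by
        cases p with
        | nil => simp at hne
        | cons _ _ => simp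
      have hlen : 0 < p.length := by
        cases p with | nil => simp at hp | cons _ _ => simp
      rw [hp, hne, hfa]
      simp only [Nat.zero_add, Bool.not_false, Bool.and_true]
      rw [decide_eq_true hlen, decide_eq_true hpos, Bool.true_and]
    · have he : (p.filter (· ≠ '_')).isEmpty = true := by
        by_contra h
        exact hpos (hcnt.mpr h)
      rw [he]
      simp only [Nat.zero_add, Bool.not_true, Bool.false_and, Bool.and_false]
      rw [decide_eq_false hpos, Bool.and_false]
  · simp only [hall, Bool.false_eq_true, if_neg, not_false_eq_true]
    have hbad : (p.filter (· ≠ '_')).all PySem.Chars.isalnum = false := by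
      rcases Bool.eq_false_or_eq_true ((p.filter (· ≠ '_')).all PySem.Chars.isalnum) with h | h
      · exfalso
        apply hall
        simp only [List.all_eq_true]
        intro c hm
        by_cases h_ : c = '_'
        · simp [h_]
        · have hcf : c ∈ p.filter (· ≠ '_') := by
            simp [List.mem_filter, hm, h_]
          simp only [List.all_eq_true] at h
          simp [h c hcf]
      · exact h
    rw [hbad, Bool.and_false, Bool.and_false]

lemma evalParts_eq_A (parts : List (List Char)) : ∀ d : Nat, parts ≠ [] →
    evalParts parts 0 0 d =
      (decide (2 ≤ d + parts.length) &&
        parts.all (fun p => !p.isEmpty && PySem.Chars.strIsalnum (PySem.Chars.replace p ['_'] []))) := by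
  induction parts with
  | nil => intro d h; exact absurd rfl h
  | cons p ps ih =>
    intro d _
    cases ps with
    | nil =>
      have hgood := partGood_eq p
      simp only [evalParts, List.all_cons, List.all_nil, Bool.and_true, List.length_cons,
        List.length_nil]
      cases he : evalPart p 0 0 with
      | none =>
        simp only [he] at hgood
        simp [← hgood]
      | some v =>
        rcases v with ⟨cl, ca⟩
        simp only [he] at hgood
        rw [← hgood]
        by_cases hd : 1 ≤ d
        · have h2 : 2 ≤ d + (0 + 1) := by omega
          simp [hd, h2]
        · have h2 : ¬ (2 ≤ d + (0 + 1)) := by omega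
          simp [hd, h2]
    | cons q qs =>
      have hgood := partGood_eq p
      have hrec := ih (d + 1) (by simp)
      simp only [evalParts]
      cases he : evalPart p 0 0 with
      | none =>
        simp only [he] at hgood
        simp [List.all_cons, ← hgood]
      | some v =>
        rcases v with ⟨cl, ca⟩
        simp only [he] at hgood
        by_cases hz : (cl == 0 || ca == 0) = true
        · have hfalse : (!p.isEmpty && PySem.Chars.strIsalnum (PySem.Chars.replace p ['_'] [])) = false := by
            rw [← hgood]
            simp only [Bool.or_eq_true, beq_iff_eq] at hz
            rcases hz with h | h <;> simp [h]
          simp only [hz, if_pos]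
          simp [List.all_cons, hfalse]
        · have hcl : 0 < cl := by simp only [Bool.or_eq_true, beq_iff_eq] at hz; omega
          have hca : 0 < ca := by simp only [Bool.or_eq_true, beq_iff_eq] at hz; omega
          have htrue : (!p.isEmpty && PySem.Chars.strIsalnum (PySem.Chars.replace p ['_'] [])) = true := by
            rw [← hgood]; simp [hcl, hca]
          simp only [hz, if_neg, Bool.not_eq_true]
          rw [hrec]
          simp only [List.all_cons, htrue, Bool.true_and, List.length_cons]
          congr 1
          rw [decide_eq_decide]
          omega

-- ===== VERDICT (by name: the statement is the Claim_ definition above) =====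
theorem validate_package_name_py_spec : Claim_equal_validate_package_name_py := by
  intro pn _
  unfold Spec_validate_package_name_py validate_package_name_py validate_package_name_py_alt
  by_cases h0 : pn = ""
  · simp [h0]
  · simp only [h0, if_neg, not_false_eq_true]
    rw [altLoop_eq, splitOn_dot]
    rw [evalParts_eq_A _ 0 (simpleSplit_ne_nil _)]
    by_cases hlen : (simpleSplit pn.toList).length < 2
    · simp [hlen]
    · simp only [hlen, if_neg, not_false_eq_true]
      simp only [Nat.zero_add]
      rw [decide_eq_true (by omega : 2 ≤ (simpleSplit pn.toList).length), Bool.true_and]
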